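-- pv_equiv track=rewrite | github.com/miliar/Code_Jam_Webscraper | solutions_python/Problem_212/281.py | solve
-- ===== SOURCE A (Python) =====
-- from collections import Counter
--
-- def solve(p, groups):
--     mod_groups = Counter()
--     for group in groups:
--         mod_groups[group % p] += 1
--
--     pack_sum = 0
--     whole_pack_groups = 0
--     while sum(mod_groups.values()):
--         # If starting with a fresh pack, add one to the balanced group count
--         if pack_sum == 0:
--             whole_pack_groups += 1
--
--         # Take a group that balances first, or if not possible, the smallest group
--         ideal_pack = (p - pack_sum) % p
--         if mod_groups[ideal_pack] > 0:
--             pack_sum += ideal_pack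
--             mod_groups[ideal_pack] -= 1
--             if mod_groups[ideal_pack] == 0:
--                 del mod_groups[ideal_pack]
--         else:
--             pack_sum += min(mod_groups)
--             mod_groups[min(mod_groups)] -= 1
--             if mod_groups[min(mod_groups)] == 0:
--                 del mod_groups[min(mod_groups)]
--         pack_sum %= p
--     return whole_pack_groups
-- ===== SOURCE B (Python) =====
-- from collections import Counter, deque
--
-- def solve(p, groups):
--     # Different structure than the Counter-rescan greedy: residue counts are
--     # built once; a deque of the sorted distinct residues is consumed by a
--     # monotone pointer (popleft past exhausted residues), so there is no
--     # per-iteration sum()/min() rescan; the loop is decomposed per pack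
--     # (outer loop = one pack, inner loop = fill it until balanced).
--     cnt = Counter(g % p for g in groups)
--     order = deque(sorted(cnt))
--     remaining = len(groups)
--     packs = 0
--     while remaining:
--         packs += 1
--         acc = 0
--         closing = True
--         while closing and remaining:
--             need = (-acc) % p
--             if cnt[need] > 0:
--                 cnt[need] -= 1
--                 remaining -= 1
--                 closing = False
--             else:
--                 while cnt[order[0]] == 0:
--                     order.popleft()
--                 m = order[0]
--                 cnt[m] -= 1
--                 remaining -= 1
--                 acc = (acc + m) % p
--     return packs
-- ===== Notes on version B (the rewrite author's own statement) =====
-- stated objective: faster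
-- what changed: Replaces the loop that rescans the Counter every iteration (sum(values) as the loop test, min(dict) recomputed up to three times per step, per-key delete bookkeeping) by a per-pack decomposition over fixed residue counts: a running 'remaining' total is the loop test, the current minimum residue comes from a monotone pointer (a deque of the sorted distinct residues popped left past exhausted entries, never rescanned), and an outer loop per pack with an inner loop that fills it until balanced.
import Mathlib
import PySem

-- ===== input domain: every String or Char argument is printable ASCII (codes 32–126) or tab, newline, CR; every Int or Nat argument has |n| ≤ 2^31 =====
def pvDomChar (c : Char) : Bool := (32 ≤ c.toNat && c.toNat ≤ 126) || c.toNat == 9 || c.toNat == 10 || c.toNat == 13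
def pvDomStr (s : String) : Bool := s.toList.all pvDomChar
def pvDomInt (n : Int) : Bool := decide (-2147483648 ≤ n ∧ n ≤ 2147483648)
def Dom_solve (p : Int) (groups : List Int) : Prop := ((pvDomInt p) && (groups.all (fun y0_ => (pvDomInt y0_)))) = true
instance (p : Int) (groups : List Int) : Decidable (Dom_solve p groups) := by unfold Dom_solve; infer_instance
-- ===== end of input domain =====

-- B builds the residue counts once and replaces A's per-iteration Counter rescans
-- (sum(values) loop test, repeated min(dict)) by a running 'remaining' total and a
-- monotone pointer over the sorted distinct residues, decomposed per pack
-- (outer loop = one pack, inner loop = fill it until balanced); same return value.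

-- ===== PORT A =====
-- while loop of A: each iteration removes exactly one group occurrence, so
-- `groups.length` fuel is exact; at fuel 0 the Python loop condition is false and it
-- returns whole_pack_groups, which the fuel-0 branch mirrors.
def solveLoopA (p : Int) (fuel : Nat) (mg : PySem.Dict Int Int) (pack_sum whole : Int) : Int :=
  match fuel with
  | 0 => whole
  | Nat.succ fuel =>
    if mg.values.sum ≠ 0 then
      -- if pack_sum == 0: whole_pack_groups += 1
      let whole := if pack_sum = 0 then whole + 1 else whole
      let ideal := PySem.Int.mod (p - pack_sum) p
      if mg.getD ideal 0 > 0 then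
        let ps := pack_sum + ideal
        let mg1 := mg.insert ideal (mg.getD ideal 0 - 1)
        let mg2 := if mg1.getD ideal 0 = 0 then mg1.erase ideal else mg1
        solveLoopA p fuel mg2 (PySem.Int.mod ps p) whole
      else
        -- min(mod_groups): Python min over the dict's keys (raises on an empty dict —
        -- unreachable from solve, where the dict is nonempty whenever the sum is nonzero)
        match PySem.List.min? mg.keys (fun x => x) with
        | none => whole
        | some m =>
          -- the two later recomputations of min(mod_groups) see the same key set
          -- (in-place update of an existing key), hence the same m
          let ps := pack_sum + m
          let mg1 := mg.insert m (mg.getD m 0 - 1)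
          let mg2 := if mg1.getD m 0 = 0 then mg1.erase m else mg1
          solveLoopA p fuel mg2 (PySem.Int.mod ps p) whole
    else whole

def solve (p : Int) (groups : List Int) : Int :=
  -- mod_groups = Counter(); for group in groups: mod_groups[group % p] += 1
  let mg := groups.foldl (fun d g => d.modify (PySem.Int.mod g p) 0 (· + 1)) PySem.Dict.empty
  solveLoopA p groups.length mg 0 0

-- ===== PORT B =====
-- while cnt[order[0]] == 0: order.popleft()  (the monotone minimum pointer)
def advB (cnt : PySem.Dict Int Int) : List Int → List Int
  | [] => []   -- Python would raise IndexError here; unreachable while groups remain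
  | o :: os => if cnt.getD o 0 = 0 then advB cnt os else o :: os

-- inner 'while closing and remaining' loop; 'remaining' is both the Python counter
-- and the fuel (every iteration decrements it); returns (cnt, order, remaining)
def innerB (p : Int) : Nat → PySem.Dict Int Int → List Int → Int →
    PySem.Dict Int Int × List Int × Nat
  | 0, cnt, order, _ => (cnt, order, 0)
  | Nat.succ rem, cnt, order, acc =>
    let need := PySem.Int.mod (-acc) p
    if cnt.getD need 0 > 0 then
      (cnt.insert need (cnt.getD need 0 - 1), order, rem)   -- pack closed
    else
      match advB cnt order with
      | [] => (cnt, [], 0)   -- unreachable (Python IndexError)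
      | m :: os =>
        innerB p rem (cnt.insert m (cnt.getD m 0 - 1)) (m :: os) (PySem.Int.mod (acc + m) p)

-- outer 'while remaining' loop: one iteration per pack; each pack consumes at least
-- one group, so `groups.length` fuel is enough
def outerB (p : Int) : Nat → PySem.Dict Int Int → List Int → Nat → Int → Int
  | 0, _, _, _, packs => packs
  | Nat.succ fuel, cnt, order, remaining, packs =>
    if remaining = 0 then packs
    else
      let t := innerB p remaining cnt order 0
      outerB p fuel t.1 t.2.1 t.2.2 (packs + 1)

def solve_alt (p : Int) (groups : List Int) : Int :=
  -- cnt = Counter(g % p for g in groups); order = deque(sorted(cnt))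
  let cnt := PySem.Dict.counter (groups.map (fun g => PySem.Int.mod g p))
  let order := PySem.List.sorted cnt.keys (fun x => x) false
  outerB p groups.length cnt order groups.length 0

-- ===== PRECONDITION & SPEC =====
-- Pre_ excludes only p = 0 with a nonempty list, where A raises ZeroDivisionError.
def Pre_solve (p : Int) (groups : List Int) : Prop := p ≠ 0 ∨ groups = []
instance (p : Int) (groups : List Int) : Decidable (Pre_solve p groups) := by unfold Pre_solve; infer_instance
def pvWitness_solve : Int × List Int := (3, [2, 5, 2, 3, 0])
def Spec_solve (p : Int) (groups : List Int) (out : Int) : Prop := out = solve_alt p groups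
instance (p : Int) (groups : List Int) (out : Int) : Decidable (Spec_solve p groups out) := by unfold Spec_solve; infer_instance

-- ===== CLAIM (what is proved, stated in full; the proofs are below) =====
def Claim_equal_solve : Prop := ∀ (p : Int) (groups : List Int), Dom_solve p groups → Pre_solve p groups → Spec_solve p groups (solve p groups)

-- ===== LEMMAS AND PROOFS =====

-- proof-side intermediate: the greedy as one flat loop over the sorted residue
-- multiset; A is proved equal to it (pv_main) and B is proved equal to it (pv_outer)
def flatLoop (p : Int) (fuel : Nat) (rest : List Int) (acc packs : Int) : Int :=
  match fuel, rest with
  | 0, _ => packs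
  | _ + 1, [] => packs
  | Nat.succ fuel, r :: rs =>
    let packs := if acc = 0 then packs + 1 else packs
    let need := PySem.Int.mod (-acc) p
    if need ∈ (r :: rs) then
      flatLoop p fuel ((r :: rs).erase need) 0 packs
    else
      flatLoop p fuel rs (PySem.Int.mod (acc + r) p) packs

-- PySem.Dict.erase has no prepared lemmas; these characterise it.
theorem pv_find?_filter {ν : Type} (l : List (Int × ν)) (k k' : Int) :
    ((l.filter (fun p => !(p.1 == k))).find? (fun p => p.1 == k')) =
      (if k' = k then none else l.find? (fun p => p.1 == k')) := by
  induction l with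
  | nil => simp
  | cons a t ih =>
    rcases eq_or_ne a.1 k with h1 | h1
    · have hb1 : (a.1 == k) = true := by simp [h1]
      rcases eq_or_ne k' k with rfl | h3
      · simp [hb1, ih]
      · have hb2 : (a.1 == k') = false := by
          simp only [beq_eq_false_iff_ne, h1]
          exact fun h => h3 h.symm
        simp [hb1, hb2, h3, ih]
    · have hb1 : (a.1 == k) = false := by simp [h1]
      rcases eq_or_ne a.1 k' with h2 | h2
      · have h3 : k' ≠ k := fun hh => h1 (h2.trans hh)
        have hb2 : (a.1 == k') = true := by simp [h2]
        simp [hb1, hb2, h3]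
      · have hb2 : (a.1 == k') = false := by simp [h2]
        simp [hb1, hb2, ih]

theorem pv_any_filter {ν : Type} (l : List (Int × ν)) (k k' : Int) :
    ((l.filter (fun p => !(p.1 == k))).any (fun p => p.1 == k')) =
      (if k' = k then false else l.any (fun p => p.1 == k')) := by
  induction l with
  | nil => simp
  | cons a t ih =>
    rcases eq_or_ne a.1 k with h1 | h1
    · have hb1 : (a.1 == k) = true := by simp [h1]
      rcases eq_or_ne k' k with rfl | h3
      · simp [hb1, ih]
      · have hb2 : (a.1 == k') = false := by
          simp only [beq_eq_false_iff_ne, h1]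
          exact fun h => h3 h.symm
        simp [hb1, hb2, h3, ih]
    · have hb1 : (a.1 == k) = false := by simp [h1]
      rcases eq_or_ne a.1 k' with h2 | h2
      · have h3 : k' ≠ k := fun hh => h1 (h2.trans hh)
        have hb2 : (a.1 == k') = true := by simp [h2]
        simp [hb1, hb2, h3]
      · have hb2 : (a.1 == k') = false := by simp [h2]
        simp [hb1, hb2, ih]

theorem pv_getD_erase {ν : Type} (d : PySem.Dict Int ν) (k k' : Int) (dflt : ν) :
    (d.erase k).getD k' dflt = if k' = k then dflt else d.getD k' dflt := by
  obtain ⟨l⟩ := d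
  simp only [PySem.Dict.erase, PySem.Dict.getD, PySem.Dict.get?, pv_find?_filter]
  split <;> simp

theorem pv_contains_erase {ν : Type} (d : PySem.Dict Int ν) (k k' : Int) :
    (d.erase k).contains k' = if k' = k then false else d.contains k' := by
  obtain ⟨l⟩ := d
  simp only [PySem.Dict.erase, PySem.Dict.contains, pv_any_filter]

theorem pv_keys_erase_sublist {ν : Type} (d : PySem.Dict Int ν) (k : Int) :
    (d.erase k).keys.Sublist d.keys := by
  obtain ⟨l⟩ := d
  simpa [PySem.Dict.erase, PySem.Dict.keys] using
    (List.Sublist.map (fun p : Int × ν => p.1) (List.filter_sublist (l := l)))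

-- one greedy step: taking one occurrence of v out of the dict matches erasing it from the list
theorem pv_step (mg : PySem.Dict Int Int) (rest : List Int) (v : Int)
    (hc : ∀ k, mg.getD k 0 = (rest.count k : Int))
    (hnd : mg.keys.Nodup)
    (hmem : ∀ k, k ∈ mg.keys ↔ k ∈ rest)
    (hv : v ∈ rest) :
    (∀ k, (if (mg.insert v (mg.getD v 0 - 1)).getD v 0 = 0
        then (mg.insert v (mg.getD v 0 - 1)).erase v
        else mg.insert v (mg.getD v 0 - 1)).getD k 0 = (((rest.erase v).count k : Int))) ∧
    (if (mg.insert v (mg.getD v 0 - 1)).getD v 0 = 0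
        then (mg.insert v (mg.getD v 0 - 1)).erase v
        else mg.insert v (mg.getD v 0 - 1)).keys.Nodup ∧
    (∀ k, k ∈ (if (mg.insert v (mg.getD v 0 - 1)).getD v 0 = 0
        then (mg.insert v (mg.getD v 0 - 1)).erase v
        else mg.insert v (mg.getD v 0 - 1)).keys ↔ k ∈ rest.erase v) := by
  have hcnt : 1 ≤ rest.count v := List.count_pos_iff.2 hv
  have hins : ∀ k : Int, (mg.insert v (mg.getD v 0 - 1)).getD k 0
      = if k = v then (rest.count v : Int) - 1 else (rest.count k : Int) := by
    intro k
    rw [PySem.Dict.getD_insert, hc v, hc k]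
  have hcount : ∀ k : Int, ((rest.erase v).count k : Int)
      = if k = v then (rest.count v : Int) - 1 else (rest.count k : Int) := by
    intro k
    by_cases hkv : k = v
    · rw [if_pos hkv, hkv, List.count_erase_self]
      omega
    · rw [if_neg hkv, List.count_erase_of_ne hkv]
  have hnd1 : (mg.insert v (mg.getD v 0 - 1)).keys.Nodup := PySem.Dict.nodup_keys_insert _ _ _ hnd
  have hmem1 : ∀ k : Int, ((mg.insert v (mg.getD v 0 - 1)).contains k)
      = (k == v || mg.contains k) := fun k => PySem.Dict.contains_insert _ _ _ _
  have hcontains : ∀ k : Int, mg.contains k = true ↔ k ∈ rest := by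
    intro k; rw [PySem.Dict.contains_iff_mem_keys]; exact hmem k
  have hgv : (mg.insert v (mg.getD v 0 - 1)).getD v 0 = (rest.count v : Int) - 1 := by
    rw [hins v, if_pos rfl]
  by_cases h0 : ((rest.count v : Int) - 1 = 0)
  · have hcond : (mg.insert v (mg.getD v 0 - 1)).getD v 0 = 0 := by rw [hgv]; exact h0
    refine ⟨?_, ?_, ?_⟩
    · intro k
      rw [if_pos hcond, pv_getD_erase, hcount k]
      by_cases hkv : k = v
      · rw [if_pos hkv, if_pos hkv]
        exact h0.symm
      · rw [if_neg hkv, if_neg hkv, hins k, if_neg hkv]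
    · rw [if_pos hcond]
      exact List.Nodup.sublist (pv_keys_erase_sublist _ _) hnd1
    · intro k
      rw [if_pos hcond, ← PySem.Dict.contains_iff_mem_keys, pv_contains_erase]
      by_cases hkv : k = v
      · rw [if_pos hkv]
        simp only [Bool.false_eq_true, false_iff]
        intro hk
        have h1 := List.count_pos_iff.2 hk
        have h2 := hcount k
        rw [if_pos hkv] at h2
        omega
      · rw [if_neg hkv, hmem1 k]
        have hb : (k == v) = false := by simp [hkv]
        rw [hb]
        simp only [Bool.false_or]
        rw [hcontains k, List.mem_erase_of_ne hkv]
  · have hcond : ¬ (mg.insert v (mg.getD v 0 - 1)).getD v 0 = 0 := by rw [hgv]; exact h0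
    refine ⟨?_, ?_, ?_⟩
    · intro k
      rw [if_neg hcond, hins k, hcount k]
    · rw [if_neg hcond]
      exact hnd1
    · intro k
      rw [if_neg hcond, ← PySem.Dict.contains_iff_mem_keys, hmem1 k]
      by_cases hkv : k = v
      · have hb : (k == v) = true := by simp [hkv]
        rw [hb]
        simp only [Bool.true_or, true_iff]
        have h2 := hcount k
        rw [if_pos hkv] at h2
        exact List.count_pos_iff.1 (by omega)
      · have hb : (k == v) = false := by simp [hkv]
        rw [hb]
        simp only [Bool.false_or]
        rw [hcontains k, List.mem_erase_of_ne hkv]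

theorem pv_mod_shift (p a : Int) : PySem.Int.mod (p - a) p = PySem.Int.mod (-a) p := by
  show Int.fmod (p - a) p = Int.fmod (-a) p
  have h : p - a = -a + p * 1 := by ring
  rw [h, Int.add_mul_fmod_self_left]

theorem pv_mod_need_zero (p a : Int) :
    PySem.Int.mod (a + PySem.Int.mod (-a) p) p = 0 := by
  rw [PySem.Int.mod_eq_zero_iff_dvd]
  have h := PySem.Int.floordiv_mul_add_mod (-a) p
  have h2 : a + PySem.Int.mod (-a) p = -(PySem.Int.floordiv (-a) p * p) := by linarith
  rw [h2]
  exact dvd_neg.2 (dvd_mul_left p _)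

-- taking g % p is idempotent: elements of the residue list are canonical residues
theorem pv_mod_idem (a p : Int) :
    PySem.Int.mod (PySem.Int.mod a p) p = PySem.Int.mod a p := by
  have h := PySem.Int.floordiv_mul_add_mod a p
  have h2 : PySem.Int.mod a p = a + p * (-(PySem.Int.floordiv a p)) := by linarith
  calc PySem.Int.mod (PySem.Int.mod a p) p
      = PySem.Int.mod (a + p * (-(PySem.Int.floordiv a p))) p := by rw [← h2]
    _ = PySem.Int.mod a p := by
        show (a + p * (-(PySem.Int.floordiv a p))).fmod p = a.fmod p
        exact Int.add_mul_fmod_self_left a p (-(PySem.Int.floordiv a p))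

-- A's loop equals the flat greedy over the sorted residue multiset
theorem pv_main (p : Int) (_hp : p ≠ 0) :
    ∀ (fuel : Nat) (mg : PySem.Dict Int Int) (rest : List Int) (acc w : Int),
      (∀ k, mg.getD k 0 = (rest.count k : Int)) →
      mg.keys.Nodup →
      (∀ k, k ∈ mg.keys ↔ k ∈ rest) →
      rest.Pairwise (· ≤ ·) →
      rest.length = fuel →
      solveLoopA p fuel mg acc w = flatLoop p fuel rest acc w := by
  intro fuel
  induction fuel with
  | zero => intro mg rest acc w _ _ _ _ _; rfl
  | succ n ih =>
    intro mg rest acc w hc hnd hmem hs hlen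
    cases rest with
    | nil => simp at hlen
    | cons r rs =>
      have hrmem : r ∈ r :: rs := List.mem_cons_self
      have hkeysne : mg.keys ≠ [] := by
        intro h
        have := (hmem r).2 hrmem
        rw [h] at this
        exact List.not_mem_nil this
      have hpos : ∀ x ∈ mg.values, 0 < x := by
        rw [PySem.Dict.values_eq_map_keys mg hnd 0]
        intro x hx
        obtain ⟨k, hk, rfl⟩ := List.mem_map.1 hx
        rw [hc k]
        exact_mod_cast List.count_pos_iff.2 ((hmem k).1 hk)
      have hsum : mg.values.sum ≠ 0 := by
        have hne : mg.values ≠ [] := by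
          rw [PySem.Dict.values_eq_map_keys mg hnd 0]
          simpa using hkeysne
        have := List.sum_pos _ hpos hne
        omega
      simp only [solveLoopA, flatLoop]
      rw [if_pos hsum, pv_mod_shift]
      by_cases hneed : PySem.Int.mod (-acc) p ∈ r :: rs
      · have hgt : mg.getD (PySem.Int.mod (-acc) p) 0 > 0 := by
          rw [hc]
          exact_mod_cast List.count_pos_iff.2 hneed
        rw [if_pos hgt, if_pos hneed]
        obtain ⟨sc, snd, smem⟩ := pv_step mg (r :: rs) (PySem.Int.mod (-acc) p) hc hnd hmem hneed
        rw [pv_mod_need_zero]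
        exact ih _ _ _ _ sc snd smem
          (List.Pairwise.sublist List.erase_sublist hs)
          (by rw [List.length_erase_of_mem hneed]; simpa using hlen)
      · have hgt : ¬ (mg.getD (PySem.Int.mod (-acc) p) 0 > 0) := by
          rw [hc]
          intro h
          exact hneed (List.count_pos_iff.1 (by exact_mod_cast h))
        rw [if_neg hgt, if_neg hneed]
        have hminex : ∃ m, PySem.List.min? mg.keys (fun x => x) = some m := by
          cases h : PySem.List.min? mg.keys (fun x => x) with
          | none => exact absurd ((PySem.List.min?_eq_none_iff _ _).1 h) hkeysne
          | some m => exact ⟨m, rfl⟩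
        obtain ⟨m, hm⟩ := hminex
        have hmr : m = r := by
          have hmk := PySem.List.min?_mem hm
          have hmrest : m ∈ r :: rs := (hmem m).1 hmk
          have h1 : m ≤ r := PySem.List.min?_isMin hm r ((hmem r).2 hrmem)
          have h2 : r ≤ m := by
            rcases List.mem_cons.1 hmrest with rfl | hmr2
            · exact le_refl _
            · exact List.rel_of_pairwise_cons hs hmr2
          exact le_antisymm h1 h2
        rw [hm, hmr]
        obtain ⟨sc, snd, smem⟩ := pv_step mg (r :: rs) r hc hnd hmem hrmem
        rw [List.erase_cons_head] at sc smem
        exact ih _ _ _ _ sc snd smem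
          (List.Pairwise.of_cons hs)
          (by simpa using hlen)

-- ===== lemmas for the B side =====

theorem pv_advB_sublist (cnt : PySem.Dict Int Int) :
    ∀ order : List Int, (advB cnt order).Sublist order := by
  intro order
  induction order with
  | nil => simp [advB]
  | cons o os ih =>
    simp only [advB]
    split_ifs
    · exact ih.trans (List.sublist_cons_self o os)
    · exact List.Sublist.refl _

theorem pv_advB_mem (cnt : PySem.Dict Int Int) :
    ∀ (order : List Int) (x : Int), x ∈ order → cnt.getD x 0 ≠ 0 → x ∈ advB cnt order := by
  intro order
  induction order with
  | nil => intro x hx; exact absurd hx (List.not_mem_nil)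
  | cons o os ih =>
    intro x hx hx0
    simp only [advB]
    split_ifs with h0
    · rcases List.mem_cons.1 hx with rfl | hx'
      · exact absurd h0 hx0
      · exact ih x hx' hx0
    · exact hx

theorem pv_advB_head (cnt : PySem.Dict Int Int) :
    ∀ (order : List Int) (m : Int) (os : List Int),
      advB cnt order = m :: os → cnt.getD m 0 ≠ 0 := by
  intro order
  induction order with
  | nil => intro m os h; simp [advB] at h
  | cons o os' ih =>
    intro m os h
    simp only [advB] at h
    split_ifs at h with h0
    · exact ih m os h
    · cases h
      exact h0

-- packs accumulator is additive in flatLoop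
theorem pv_flat_add (p : Int) :
    ∀ (f : Nat) (rest : List Int) (acc w c : Int),
      flatLoop p f rest acc (w + c) = flatLoop p f rest acc w + c := by
  intro f
  induction f with
  | zero => intros; rfl
  | succ n ih =>
    intro rest acc w c
    cases rest with
    | nil => rfl
    | cons r rs =>
      simp only [flatLoop]
      by_cases h : acc = 0
      · rw [if_pos h, if_pos h]
        have he : w + c + 1 = (w + 1) + c := by ring
        rw [he]
        split_ifs
        · exact ih _ _ _ _
        · exact ih _ _ _ _
      · rw [if_neg h, if_neg h]
        split_ifs
        · exact ih _ _ _ _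
        · exact ih _ _ _ _

theorem pv_outer_zero (p : Int) (f : Nat) (cnt : PySem.Dict Int Int)
    (order : List Int) (packs : Int) : outerB p f cnt order 0 packs = packs := by
  cases f <;> simp [outerB]

-- the key simulation: one inner run followed by the rest of the outer loop equals the
-- flat greedy, up to the pack increment of the current step (which outerB did already)
theorem pv_key (p : Int) :
    ∀ (n : Nat) (rest : List Int) (cnt : PySem.Dict Int Int) (order : List Int)
      (acc packs : Int) (fuelO : Nat),
      (∀ k, cnt.getD k 0 = (rest.count k : Int)) →
      rest.Pairwise (· ≤ ·) →
      (∀ x ∈ rest, PySem.Int.mod x p = x) →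
      order.Pairwise (· ≤ ·) →
      (∀ k, k ∈ rest → k ∈ order) →
      rest.length = n → n ≤ fuelO + 1 →
      (outerB p fuelO (innerB p n cnt order acc).1 (innerB p n cnt order acc).2.1
          (innerB p n cnt order acc).2.2 packs)
        + (if acc = 0 ∧ n ≠ 0 then 1 else 0)
        = flatLoop p n rest acc packs := by
  intro n
  induction n with
  | zero =>
    intro rest cnt order acc packs fuelO hc hs hcan hop hom hlen hf
    have hre : rest = [] := List.eq_nil_of_length_eq_zero hlen
    subst hre
    simp [innerB, flatLoop, pv_outer_zero]
  | succ m ih =>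
    intro rest cnt order acc packs fuelO hc hs hcan hop hom hlen hf
    cases rest with
    | nil => simp at hlen
    | cons r rs =>
      have hmlen : rs.length = m := by simpa using hlen
      have hrmem : r ∈ r :: rs := List.mem_cons_self
      simp only [flatLoop]
      by_cases hneed : PySem.Int.mod (-acc) p ∈ r :: rs
      · -- pack closes: complement found
        have hgt : cnt.getD (PySem.Int.mod (-acc) p) 0 > 0 := by
          rw [hc]
          exact_mod_cast List.count_pos_iff.2 hneed
        rw [if_pos hneed]
        have hinner : innerB p (Nat.succ m) cnt order acc
            = (cnt.insert (PySem.Int.mod (-acc) p)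
                 (cnt.getD (PySem.Int.mod (-acc) p) 0 - 1), order, m) := by
          simp [innerB, hgt]
        simp only [hinner]
        set v := PySem.Int.mod (-acc) p with hv
        -- invariants for the erased list
        have hc' : ∀ k, (cnt.insert v (cnt.getD v 0 - 1)).getD k 0
            = (((r :: rs).erase v).count k : Int) := by
          intro k
          rw [PySem.Dict.getD_insert]
          by_cases hkv : k = v
          · rw [if_pos hkv, hc v, hkv, List.count_erase_self]
            have := List.count_pos_iff.2 hneed
            omega
          · rw [if_neg hkv, hc k, List.count_erase_of_ne hkv]
        have hs' : ((r :: rs).erase v).Pairwise (· ≤ ·) :=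
          List.Pairwise.sublist List.erase_sublist hs
        have hcan' : ∀ x ∈ (r :: rs).erase v, PySem.Int.mod x p = x := fun x hx =>
          hcan x (List.erase_sublist.mem hx)
        have hom' : ∀ k, k ∈ (r :: rs).erase v → k ∈ order := fun k hk =>
          hom k (List.erase_sublist.mem hk)
        have hlen' : ((r :: rs).erase v).length = m := by
          rw [List.length_erase_of_mem hneed]; simpa using hlen
        cases m with
        | zero =>
          rw [pv_outer_zero]
          have hre : (r :: rs).erase v = [] := List.eq_nil_of_length_eq_zero hlen'
          rw [hre]
          by_cases ha : acc = 0
          · rw [if_pos (⟨ha, Nat.succ_ne_zero 0⟩ : acc = 0 ∧ Nat.succ 0 ≠ 0), if_pos ha]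
            rfl
          · rw [if_neg (fun hcon => ha hcon.1), if_neg ha]
            simp [flatLoop]
        | succ mm =>
          obtain ⟨f, rfl⟩ : ∃ f, fuelO = f + 1 := ⟨fuelO - 1, by omega⟩
          have hstep : outerB p (f + 1) (cnt.insert v (cnt.getD v 0 - 1)) order
              (Nat.succ mm) packs
              = outerB p f (innerB p (Nat.succ mm) (cnt.insert v (cnt.getD v 0 - 1)) order 0).1
                  (innerB p (Nat.succ mm) (cnt.insert v (cnt.getD v 0 - 1)) order 0).2.1
                  (innerB p (Nat.succ mm) (cnt.insert v (cnt.getD v 0 - 1)) order 0).2.2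
                  (packs + 1) := by
            simp [outerB]
          rw [hstep]
          have hihres := ih ((r :: rs).erase v) (cnt.insert v (cnt.getD v 0 - 1)) order 0
            (packs + 1) f hc' hs' hcan' hop hom' hlen' (by omega)
          rw [if_pos (⟨rfl, Nat.succ_ne_zero mm⟩ : (0:Int) = 0 ∧ Nat.succ mm ≠ 0)] at hihres
          have hadd := pv_flat_add p (Nat.succ mm) ((r :: rs).erase v) 0 packs 1
          simp only [Nat.succ_eq_add_one] at hihres hadd ⊢
          by_cases ha : acc = 0
          · rw [if_pos (⟨ha, Nat.succ_ne_zero (Nat.succ mm)⟩ :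
                acc = 0 ∧ Nat.succ (Nat.succ mm) ≠ 0), if_pos ha]
            omega
          · rw [if_neg (fun hcon => ha hcon.1), if_neg ha]
            omega
      · -- no complement: take the minimum via the pointer
        have hgt : ¬ (cnt.getD (PySem.Int.mod (-acc) p) 0 > 0) := by
          rw [hc]
          intro h
          exact hneed (List.count_pos_iff.1 (by exact_mod_cast h))
        rw [if_neg hneed]
        -- advB yields exactly the head r of the sorted remaining multiset
        have hr0 : cnt.getD r 0 ≠ 0 := by
          rw [hc r]
          have := List.count_pos_iff.2 hrmem
          omega
        have hradv : r ∈ advB cnt order := pv_advB_mem cnt order r (hom r hrmem) hr0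
        obtain ⟨m', os, hadv⟩ : ∃ m' os, advB cnt order = m' :: os := by
          cases h : advB cnt order with
          | nil => rw [h] at hradv; exact absurd hradv (List.not_mem_nil)
          | cons a b => exact ⟨a, b, rfl⟩
        have hm'r : m' = r := by
          have hm0 : cnt.getD m' 0 ≠ 0 := pv_advB_head cnt order m' os hadv
          have hm'mem : m' ∈ r :: rs := by
            rw [hc m'] at hm0
            have hne : (r :: rs).count m' ≠ 0 := by exact_mod_cast hm0
            exact List.count_pos_iff.1 (Nat.pos_of_ne_zero hne)
          have h1 : r ≤ m' := by
            rcases List.mem_cons.1 hm'mem with rfl | h'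
            · exact le_refl _
            · exact List.rel_of_pairwise_cons hs h'
          have h2 : m' ≤ r := by
            have hpw : (advB cnt order).Pairwise (· ≤ ·) :=
              List.Pairwise.sublist (pv_advB_sublist cnt order) hop
            rw [hadv] at hpw hradv
            rcases List.mem_cons.1 hradv with h' | h'
            · exact le_of_eq h'.symm
            · exact List.rel_of_pairwise_cons hpw h'
          exact le_antisymm h2 h1
        rw [hm'r] at hadv
        have hinner : innerB p (Nat.succ m) cnt order acc
            = innerB p m (cnt.insert r (cnt.getD r 0 - 1)) (r :: os)
                (PySem.Int.mod (acc + r) p) := by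
          simp [innerB, hgt, hadv]
        simp only [hinner]
        -- invariants for the tail
        have hc' : ∀ k, (cnt.insert r (cnt.getD r 0 - 1)).getD k 0 = (rs.count k : Int) := by
          intro k
          rw [PySem.Dict.getD_insert]
          by_cases hkr : k = r
          · rw [if_pos hkr, hc r, hkr, List.count_cons_self]
            omega
          · rw [if_neg hkr, hc k]
            have hrk : ¬ r = k := fun h => hkr h.symm
            have hcc : (r :: rs).count k = rs.count k := by
              simp [hrk]
            rw [hcc]
        have hs' : rs.Pairwise (· ≤ ·) := List.Pairwise.of_cons hs
        have hcan' : ∀ x ∈ rs, PySem.Int.mod x p = x := fun x hx =>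
          hcan x (List.mem_cons_of_mem r hx)
        have hop' : (r :: os).Pairwise (· ≤ ·) := by
          have hsub := List.Pairwise.sublist (pv_advB_sublist cnt order) hop
          rwa [hadv] at hsub
        have hom' : ∀ k, k ∈ rs → k ∈ r :: os := by
          intro k hk
          by_cases hkr : k = r
          · rw [hkr]; exact List.mem_cons_self
          · have hk0 : cnt.getD k 0 ≠ 0 := by
              rw [hc k]
              have hpos : 0 < (r :: rs).count k :=
                List.count_pos_iff.2 (List.mem_cons_of_mem r hk)
              omega
            have hmm := pv_advB_mem cnt order k (hom k (List.mem_cons_of_mem r hk)) hk0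
            rwa [hadv] at hmm
        -- the new accumulator is nonzero: otherwise r would have been the complement
        have hacc' : PySem.Int.mod (acc + r) p ≠ 0 := by
          intro h0
          have hdvd : p ∣ (acc + r) := (PySem.Int.mod_eq_zero_iff_dvd _ _).1 h0
          obtain ⟨q, hq⟩ := hdvd
          have hre : r = -acc + p * q := by omega
          have hmodr : PySem.Int.mod r p = PySem.Int.mod (-acc) p := by
            show Int.fmod r p = Int.fmod (-acc) p
            rw [hre, Int.add_mul_fmod_self_left]
          rw [hcan r hrmem] at hmodr
          exact hneed (hmodr ▸ hrmem)
        have hihres := ih rs (cnt.insert r (cnt.getD r 0 - 1)) (r :: os)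
          (PySem.Int.mod (acc + r) p) packs fuelO hc' hs' hcan' hop' hom' hmlen (by omega)
        rw [if_neg (fun hcon => hacc' hcon.1)] at hihres
        have hadd := pv_flat_add p m rs (PySem.Int.mod (acc + r) p) packs 1
        by_cases ha : acc = 0
        · rw [if_pos (⟨ha, Nat.succ_ne_zero m⟩ : acc = 0 ∧ Nat.succ m ≠ 0), if_pos ha]
          omega
        · rw [if_neg (fun hcon => ha hcon.1), if_neg ha]
          omega

-- B's outer loop equals the flat greedy
theorem pv_outer (p : Int) (n : Nat) (rest : List Int) (cnt : PySem.Dict Int Int)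
    (order : List Int) (packs : Int) (fuelO : Nat)
    (hc : ∀ k, cnt.getD k 0 = (rest.count k : Int))
    (hs : rest.Pairwise (· ≤ ·))
    (hcan : ∀ x ∈ rest, PySem.Int.mod x p = x)
    (hop : order.Pairwise (· ≤ ·))
    (hom : ∀ k, k ∈ rest → k ∈ order)
    (hlen : rest.length = n) (hf : n ≤ fuelO) :
    outerB p fuelO cnt order n packs = flatLoop p n rest 0 packs := by
  cases n with
  | zero =>
    have hre : rest = [] := List.eq_nil_of_length_eq_zero hlen
    subst hre
    rw [pv_outer_zero]
    rfl
  | succ m =>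
    obtain ⟨f, rfl⟩ : ∃ f, fuelO = f + 1 := ⟨fuelO - 1, by omega⟩
    have hstep : outerB p (f + 1) cnt order (Nat.succ m) packs
        = outerB p f (innerB p (Nat.succ m) cnt order 0).1
            (innerB p (Nat.succ m) cnt order 0).2.1
            (innerB p (Nat.succ m) cnt order 0).2.2 (packs + 1) := by
      simp [outerB]
    rw [hstep]
    have hk := pv_key p (Nat.succ m) rest cnt order 0 (packs + 1) f
      hc hs hcan hop hom hlen (by omega)
    rw [if_pos (by simp)] at hk
    have hadd := pv_flat_add p (Nat.succ m) rest 0 packs 1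
    simp only [Nat.succ_eq_add_one] at hk hadd ⊢
    omega

-- ===== VERDICT (by name: the statement is the Claim_ definition above) =====
theorem solve_spec : Claim_equal_solve := by
  unfold Claim_equal_solve
  intro p groups _ hpre
  unfold Spec_solve solve solve_alt
  rcases eq_or_ne groups [] with rfl | hg
  · rfl
  · have hp : p ≠ 0 := hpre.resolve_right hg
    have hfold : (groups.foldl (fun d g => d.modify (PySem.Int.mod g p) 0 (· + 1)) PySem.Dict.empty)
        = PySem.Dict.counter (groups.map (fun g => PySem.Int.mod g p)) := by
      rw [PySem.Dict.counter_eq_foldl, List.foldl_map]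
    rw [hfold]
    set res := groups.map (fun g => PySem.Int.mod g p) with hres
    set rest := PySem.List.sorted res (fun x => x) false with hrest
    have hperm : rest.Perm res := PySem.List.sorted_perm res (fun x => x) false
    have hlenr : rest.length = groups.length := by
      rw [PySem.List.length_sorted, hres, List.length_map]
    have hcinv : ∀ k, (PySem.Dict.counter res).getD k 0 = (rest.count k : Int) := by
      intro k
      rw [PySem.Dict.getD_counter]
      exact_mod_cast (hperm.count_eq k).symm
    have hsorted : rest.Pairwise (· ≤ ·) := by
      simpa using PySem.List.sorted_pairwise res (fun x => x)
    have hcan : ∀ x ∈ rest, PySem.Int.mod x p = x := by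
      intro x hx
      have : x ∈ res := (PySem.List.mem_sorted _ _ _ x).1 hx
      obtain ⟨g, _, rfl⟩ := List.mem_map.1 this
      exact pv_mod_idem g p
    have hA : solveLoopA p groups.length (PySem.Dict.counter res) 0 0
        = flatLoop p groups.length rest 0 0 := by
      apply pv_main p hp
      · exact hcinv
      · exact PySem.Dict.nodup_keys_counter _
      · intro k
        rw [PySem.Dict.keys_counter, PySem.Set.mem_ofList]
        exact ((PySem.List.mem_sorted _ _ _ k).symm)
      · exact hsorted
      · exact hlenr
    have hB : outerB p groups.length (PySem.Dict.counter res)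
        (PySem.List.sorted (PySem.Dict.counter res).keys (fun x => x) false)
        groups.length 0 = flatLoop p groups.length rest 0 0 := by
      apply pv_outer p groups.length rest
      · exact hcinv
      · exact hsorted
      · exact hcan
      · simpa using PySem.List.sorted_pairwise (PySem.Dict.counter res).keys (fun x => x)
      · intro k hk
        rw [PySem.List.mem_sorted, PySem.Dict.keys_counter, PySem.Set.mem_ofList]
        exact (hperm.mem_iff).1 hk
      · exact hlenr
      · exact le_refl _
    rw [hA, ← hB]
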